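-- pv_equiv track=rewrite | github.com/MetagrossNakajima/pokemon-data | script/add_abilities.py | match_base_to_entry
-- ===== SOURCE A (Python) =====
-- def match_base_to_entry(pokedex, base_name, pokedex_index, pokemons):
--     """Match a base CSV entry to a pokemons.json entry. Returns key or None."""
--     entries = pokedex_index.get(pokedex, [])
--     if not entries:
--         return None
--
--     # Exact ja match
--     for key, ja in entries:
--         if ja == base_name:
--             return key
--
--     # Match ja that starts with base_name
--     # Prefer formType=base entries, then shortest ja
--     candidates = [(key, ja) for key, ja in entries if ja.startswith(base_name)]
--     if candidates:
--         # Prefer base formType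
--         base_candidates = [c for c in candidates if pokemons[c[0]].get('formType') == 'base']
--         if base_candidates:
--             base_candidates.sort(key=lambda x: len(x[1]))
--             return base_candidates[0][0]
--         candidates.sort(key=lambda x: len(x[1]))
--         return candidates[0][0]
--
--     # Some base entries contain base_name
--     for key, ja in entries:
--         if base_name in ja:
--             return key
--
--     # Single entry: just use it
--     if len(entries) == 1:
--         return entries[0][0]
--
--     return None
-- ===== SOURCE B (Python) =====
-- def match_base_to_entry(pokedex, base_name, pokedex_index, pokemons):
--     """Single pass over the entries: track first exact match, shortest base-formType
--     prefix candidate, shortest overall prefix candidate (strict-< keeps the earliest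
--     on ties, matching the stable sort), and first substring match; then pick in
--     priority order."""
--     entries = pokedex_index.get(pokedex, [])
--     exact = None
--     best_base = None
--     best_any = None
--     first_sub = None
--     for key, ja in entries:
--         if exact is None and ja == base_name:
--             exact = key
--         if ja.startswith(base_name):
--             if pokemons.get(key, {}).get('formType') == 'base':
--                 if best_base is None or len(ja) < len(best_base[1]):
--                     best_base = (key, ja)
--             if best_any is None or len(ja) < len(best_any[1]):
--                 best_any = (key, ja)
--         if first_sub is None and base_name in ja:
--             first_sub = key
--     if exact is not None:
--         return exact
--     if best_base is not None:
--         return best_base[0]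
--     if best_any is not None:
--         return best_any[0]
--     if first_sub is not None:
--         return first_sub
--     if len(entries) == 1:
--         return entries[0][0]
--     return None
-- ===== Notes on version B (the rewrite author's own statement) =====
-- stated objective: alternative
-- what changed: B replaces A's three separate scans plus two stable sorts by a single pass over the entries that tracks the first exact match, the shortest base-formType prefix candidate, the shortest overall prefix candidate (strict < keeps the earliest on ties) and the first substring match, then picks in priority order.
import Mathlib
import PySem

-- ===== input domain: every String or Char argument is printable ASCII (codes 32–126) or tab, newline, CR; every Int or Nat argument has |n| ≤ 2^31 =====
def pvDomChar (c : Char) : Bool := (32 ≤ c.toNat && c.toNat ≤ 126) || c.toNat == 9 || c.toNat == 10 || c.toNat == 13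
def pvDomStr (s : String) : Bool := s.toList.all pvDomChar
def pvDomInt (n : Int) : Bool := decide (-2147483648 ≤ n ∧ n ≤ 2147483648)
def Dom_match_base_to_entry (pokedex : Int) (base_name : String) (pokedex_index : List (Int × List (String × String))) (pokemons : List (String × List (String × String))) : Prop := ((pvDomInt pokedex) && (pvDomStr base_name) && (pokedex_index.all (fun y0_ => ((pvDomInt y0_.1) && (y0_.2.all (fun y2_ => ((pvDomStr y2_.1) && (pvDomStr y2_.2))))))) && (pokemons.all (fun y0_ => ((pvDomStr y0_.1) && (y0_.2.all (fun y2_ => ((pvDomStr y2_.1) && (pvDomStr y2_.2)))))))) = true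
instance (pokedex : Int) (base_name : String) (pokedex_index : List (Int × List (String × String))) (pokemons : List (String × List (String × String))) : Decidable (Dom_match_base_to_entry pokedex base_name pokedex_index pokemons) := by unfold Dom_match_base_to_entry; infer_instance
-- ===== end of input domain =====

-- B replaces A's three scans plus two sorts by ONE pass over the entries that tracks
-- exact / shortest base-prefix / shortest prefix / first-substring candidates
-- (objective: alternative single-pass algorithm; B also returns where A raises KeyError).

-- ===== PORT A =====
-- `pokemons[k].get('formType') == 'base'`; exact whenever k is a key of pokemons
-- (A raises KeyError otherwise — those inputs are outside Pre_).  B's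
-- `pokemons.get(k, {}).get('formType') == 'base'` is this same function, exact on ALL inputs.
def pvFormBase (pokemons : List (String × List (String × String))) (k : String) : Bool :=
  match PySem.Dict.get? (PySem.Dict.mk pokemons) k with
  | some d => PySem.Dict.get? (PySem.Dict.mk d) "formType" == some "base"
  | none => false

def match_base_to_entry (pokedex : Int) (base_name : String) (pokedex_index : List (Int × List (String × String))) (pokemons : List (String × List (String × String))) : Option String :=
  let entries := PySem.Dict.getD (PySem.Dict.mk pokedex_index) pokedex []
  if entries.isEmpty then none else
  match entries.find? (fun p => p.2 == base_name) with
  | some p => some p.1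
  | none =>
    let candidates := entries.filter (fun p => PySem.Str.startswith p.2 base_name)
    if candidates.isEmpty then
      match entries.find? (fun p => PySem.Str.isIn base_name p.2) with
      | some p => some p.1
      | none => if entries.length == 1 then entries.head?.map (fun p => p.1) else none
    else
      let base_candidates := candidates.filter (fun c => pvFormBase pokemons c.1)
      if base_candidates.isEmpty then
        -- candidates.sort(key=len(ja)); candidates[0][0]  (list nonempty, so [0] = head)
        ((PySem.List.sorted candidates (fun p => PySem.Str.len p.2)).head?).map (fun p => p.1)
      else
        ((PySem.List.sorted base_candidates (fun p => PySem.Str.len p.2)).head?).map (fun p => p.1)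

-- ===== PORT B =====
-- the four accumulator updates of Source B's loop body, in source order
def pvEStep (base_name : String) (s : Option String) (p : String × String) : Option String :=
  match s with | some k => some k | none => if p.2 == base_name then some p.1 else none

def pvMinStep (s : Option (String × String)) (p : String × String) : Option (String × String) :=
  match s with
  | none => some p
  | some m => if PySem.Str.len p.2 < PySem.Str.len m.2 then some p else some m

def pvBBStep (base_name : String) (pokemons : List (String × List (String × String))) (s : Option (String × String)) (p : String × String) : Option (String × String) :=
  if PySem.Str.startswith p.2 base_name then
    (if pvFormBase pokemons p.1 then pvMinStep s p else s)
  else s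

def pvBAStep (base_name : String) (s : Option (String × String)) (p : String × String) : Option (String × String) :=
  if PySem.Str.startswith p.2 base_name then pvMinStep s p else s

def pvFSStep (base_name : String) (s : Option String) (p : String × String) : Option String :=
  match s with | some k => some k | none => if PySem.Str.isIn base_name p.2 then some p.1 else none

def match_base_to_entry_alt (pokedex : Int) (base_name : String) (pokedex_index : List (Int × List (String × String))) (pokemons : List (String × List (String × String))) : Option String :=
  let entries := PySem.Dict.getD (PySem.Dict.mk pokedex_index) pokedex []
  let r := entries.foldl
    (fun s p => (pvEStep base_name s.1 p, pvBBStep base_name pokemons s.2.1 p,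
                 pvBAStep base_name s.2.2.1 p, pvFSStep base_name s.2.2.2 p))
    (none, none, none, none)
  match r.1 with
  | some k => some k
  | none =>
  match r.2.1 with
  | some c => some c.1
  | none =>
  match r.2.2.1 with
  | some c => some c.1
  | none =>
  match r.2.2.2 with
  | some k => some k
  | none => if entries.length == 1 then entries.head?.map (fun p => p.1) else none

-- ===== PRECONDITION & SPEC =====
-- Pre_ excludes exactly the inputs where A raises KeyError: no exact ja match and some
-- prefix candidate's key is missing from pokemons (there pokemons[c[0]] raises).
def Pre_match_base_to_entry (pokedex : Int) (base_name : String) (pokedex_index : List (Int × List (String × String))) (pokemons : List (String × List (String × String))) : Prop :=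
  let entries := PySem.Dict.getD (PySem.Dict.mk pokedex_index) pokedex []
  (∃ p ∈ entries, p.2 = base_name) ∨
  (∀ p ∈ entries, PySem.Str.startswith p.2 base_name = true → (PySem.Dict.mk pokemons).contains p.1 = true)
instance (pokedex : Int) (base_name : String) (pokedex_index : List (Int × List (String × String))) (pokemons : List (String × List (String × String))) : Decidable (Pre_match_base_to_entry pokedex base_name pokedex_index pokemons) := by unfold Pre_match_base_to_entry; infer_instance

def pvWitness_match_base_to_entry : Int × String × (List (Int × List (String × String))) × (List (String × List (String × String))) :=
  (1, "a", [(1, [("k", "a")])], [("k", [])])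

def Spec_match_base_to_entry (pokedex : Int) (base_name : String) (pokedex_index : List (Int × List (String × String))) (pokemons : List (String × List (String × String))) (out : Option String) : Prop := out = match_base_to_entry_alt pokedex base_name pokedex_index pokemons
instance (pokedex : Int) (base_name : String) (pokedex_index : List (Int × List (String × String))) (pokemons : List (String × List (String × String))) (out : Option String) : Decidable (Spec_match_base_to_entry pokedex base_name pokedex_index pokemons out) := by unfold Spec_match_base_to_entry; infer_instance

-- ===== CLAIM (what is proved, stated in full; the proofs are below) =====
def Claim_equal_match_base_to_entry : Prop := ∀ (pokedex : Int) (base_name : String) (pokedex_index : List (Int × List (String × String))) (pokemons : List (String × List (String × String))), Dom_match_base_to_entry pokedex base_name pokedex_index pokemons → Pre_match_base_to_entry pokedex base_name pokedex_index pokemons → Spec_match_base_to_entry pokedex base_name pokedex_index pokemons (match_base_to_entry pokedex base_name pokedex_index pokemons)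

-- ===== LEMMAS AND PROOFS =====

-- B's combined fold splits into four independent folds.
theorem pvLoop_split (base_name : String) (pokemons : List (String × List (String × String))) :
    ∀ (l : List (String × String)) (E FS : Option String) (BB BA : Option (String × String)),
    l.foldl (fun s p => (pvEStep base_name s.1 p, pvBBStep base_name pokemons s.2.1 p,
                 pvBAStep base_name s.2.2.1 p, pvFSStep base_name s.2.2.2 p)) (E, BB, BA, FS)
    = (l.foldl (pvEStep base_name) E, l.foldl (pvBBStep base_name pokemons) BB,
       l.foldl (pvBAStep base_name) BA, l.foldl (pvFSStep base_name) FS) := by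
  intro l
  induction l with
  | nil => intro E FS BB BA; rfl
  | cons p t ih => intro E FS BB BA; simp only [List.foldl_cons]; exact ih _ _ _ _

theorem pvEStep_some (base_name : String) (k : String) :
    ∀ (l : List (String × String)), l.foldl (pvEStep base_name) (some k) = some k := by
  intro l; induction l with
  | nil => rfl
  | cons p t ih => simpa [pvEStep] using ih

theorem pvE_char (base_name : String) :
    ∀ (l : List (String × String)),
    l.foldl (pvEStep base_name) none = (l.find? (fun p => p.2 == base_name)).map (fun p => p.1) := by
  intro l; induction l with
  | nil => rfl
  | cons p t ih =>
    simp only [List.foldl_cons]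
    cases h : (p.2 == base_name) with
    | true =>
      have h1 : pvEStep base_name none p = some p.1 := by
        show (if (p.2 == base_name) = true then some p.1 else none) = some p.1
        rw [h]; rfl
      rw [h1, pvEStep_some, List.find?_cons_of_pos (p := fun q : String × String => q.2 == base_name) h]
      rfl
    | false =>
      have h1 : pvEStep base_name none p = none := by
        show (if (p.2 == base_name) = true then some p.1 else none) = none
        rw [h]; rfl
      rw [h1, List.find?_cons_of_neg (p := fun q : String × String => q.2 == base_name) (by simp [h])]
      exact ih

theorem pvFSStep_some (base_name : String) (k : String) :
    ∀ (l : List (String × String)), l.foldl (pvFSStep base_name) (some k) = some k := by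
  intro l; induction l with
  | nil => rfl
  | cons p t ih => simpa [pvFSStep] using ih

theorem pvFS_char (base_name : String) :
    ∀ (l : List (String × String)),
    l.foldl (pvFSStep base_name) none = (l.find? (fun p => PySem.Str.isIn base_name p.2)).map (fun p => p.1) := by
  intro l; induction l with
  | nil => rfl
  | cons p t ih =>
    simp only [List.foldl_cons]
    cases h : PySem.Str.isIn base_name p.2 with
    | true =>
      have h1 : pvFSStep base_name none p = some p.1 := by
        show (if PySem.Str.isIn base_name p.2 = true then some p.1 else none) = some p.1
        rw [h]; rfl
      rw [h1, pvFSStep_some, List.find?_cons_of_pos (p := fun q : String × String => PySem.Str.isIn base_name q.2) h]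
      rfl
    | false =>
      have h1 : pvFSStep base_name none p = none := by
        show (if PySem.Str.isIn base_name p.2 = true then some p.1 else none) = none
        rw [h]; rfl
      rw [h1, List.find?_cons_of_neg (p := fun q : String × String => PySem.Str.isIn base_name q.2) (by rw [PySem.Str.isIn_eq] at h; simp [h])]
      exact ih

theorem pvBA_char (base_name : String) (l : List (String × String)) :
    l.foldl (pvBAStep base_name) none
    = PySem.List.min? (l.filter (fun p => PySem.Str.startswith p.2 base_name)) (fun p => PySem.Str.len p.2) := by
  simp only [PySem.List.min?, List.foldl_filter]
  congr 1
  funext s p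
  cases s <;> simp [pvBAStep, pvMinStep]

theorem pvBB_char (base_name : String) (pokemons : List (String × List (String × String))) (l : List (String × String)) :
    l.foldl (pvBBStep base_name pokemons) none
    = PySem.List.min? ((l.filter (fun p => PySem.Str.startswith p.2 base_name)).filter (fun c => pvFormBase pokemons c.1)) (fun p => PySem.Str.len p.2) := by
  simp only [PySem.List.min?, List.filter_filter, List.foldl_filter]
  congr 1
  funext s p
  cases s <;> by_cases h1 : PySem.Str.startswith p.2 base_name <;>
    by_cases h2 : pvFormBase pokemons p.1 <;> simp [pvBBStep, pvMinStep, h2]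

-- head of Python's stable sort-by-key = Python min? (first minimum)
theorem pvHead_insertBy {α κ : Type} [LT κ] [DecidableLT κ] (key : α → κ) (x : α) (acc : List α) :
    (PySem.List.insertBy (fun a b => decide (key a < key b)) x acc).head?
    = match acc.head? with
      | none => some x
      | some m => if key x < key m then some x else some m := by
  cases acc with
  | nil => rfl
  | cons y ys => simp only [PySem.List.insertBy]; split <;> simp_all

theorem pvHead_foldl_insertBy {α κ : Type} [LT κ] [DecidableLT κ] (key : α → κ) :
    ∀ (l : List α) (acc : List α),
    (l.foldl (fun a x => PySem.List.insertBy (fun a b => decide (key a < key b)) x a) acc).head?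
    = l.foldl (fun o x => match o with
        | none => some x
        | some m => if key x < key m then some x else some m) acc.head? := by
  intro l
  induction l with
  | nil => intro acc; rfl
  | cons x t ih =>
    intro acc
    simp only [List.foldl_cons]
    rw [ih, pvHead_insertBy]

theorem pvHead_sorted {α κ : Type} [LT κ] [DecidableLT κ] (key : α → κ) (l : List α) :
    (PySem.List.sorted l key).head? = PySem.List.min? l key := by
  rw [PySem.List.sorted_eq_foldl_insertBy, pvHead_foldl_insertBy]
  rfl

theorem pvMin_eq_none {α κ : Type} [LT κ] [DecidableLT κ] (key : α → κ) (l : List α) :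
    PySem.List.min? l key = none ↔ l = [] := PySem.List.min?_eq_none_iff l key

-- ===== VERDICT (by name: the statement is the Claim_ definition above) =====
theorem match_base_to_entry_spec : Claim_equal_match_base_to_entry := by
  intro pokedex base_name pokedex_index pokemons _ _
  unfold Spec_match_base_to_entry match_base_to_entry match_base_to_entry_alt
  dsimp only []
  generalize PySem.Dict.getD (PySem.Dict.mk pokedex_index) pokedex [] = entries
  rw [pvLoop_split, pvE_char, pvFS_char, pvBA_char, pvBB_char]
  dsimp only []
  by_cases hemp : entries = []
  · subst hemp; simp [PySem.List.min?]
  · rw [if_neg (by simp [hemp])]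
    cases hfind : entries.find? (fun p => p.2 == base_name) with
    | some p => simp
    | none =>
      set candidates := entries.filter (fun p => PySem.Str.startswith p.2 base_name) with hc
      set base_candidates := candidates.filter (fun c => pvFormBase pokemons c.1) with hbc
      by_cases hce : candidates = []
      · have hbce : base_candidates = [] := by rw [hbc, hce]; rfl
        rw [(pvMin_eq_none _ _).mpr hce, (pvMin_eq_none _ _).mpr hbce, if_pos (by simp [hce])]
        cases hsub : entries.find? (fun p => PySem.Str.isIn base_name p.2) <;> simp
      · rw [if_neg (by simp [hce])]
        by_cases hbce : base_candidates = []
        · rw [(pvMin_eq_none _ _).mpr hbce, if_pos (by simp [hbce]), pvHead_sorted]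
          cases hmin : PySem.List.min? candidates (fun p => PySem.Str.len p.2) with
          | none => exact absurd ((pvMin_eq_none _ _).mp hmin) hce
          | some m => simp
        · rw [if_neg (by simp [hbce]), pvHead_sorted]
          cases hmin : PySem.List.min? base_candidates (fun p => PySem.Str.len p.2) with
          | none => exact absurd ((pvMin_eq_none _ _).mp hmin) hbce
          | some m => simp
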